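-- pv_equiv track=rewrite | github.com/tfursten/transmission_simulation | analysis/Analysis.py | count_unique_genomes
-- ===== SOURCE A (Python) =====
-- def count_unique_genomes(population):
--   unique_counter = 0
--   visited_genomes = []
--   for genome in population:
--     if genome not in visited_genomes:
--       visited_genomes.append(genome)
--       unique_counter += 1
--
--   return unique_counter
-- ===== SOURCE B (Python) =====
-- def count_unique_genomes(population):
--   srt = sorted(population)
--   if not srt:
--     return 0
--   prev = srt[0]
--   count = 1
--   for g in srt[1:]:
--     if g != prev:
--       count += 1
--     prev = g
--   return count
-- ===== Notes on version B (the rewrite author's own statement) =====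
-- stated objective: faster
-- what changed: Replaces the quadratic visited-list membership scan with a one-time sort followed by a single adjacent-comparison pass.
import Mathlib
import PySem

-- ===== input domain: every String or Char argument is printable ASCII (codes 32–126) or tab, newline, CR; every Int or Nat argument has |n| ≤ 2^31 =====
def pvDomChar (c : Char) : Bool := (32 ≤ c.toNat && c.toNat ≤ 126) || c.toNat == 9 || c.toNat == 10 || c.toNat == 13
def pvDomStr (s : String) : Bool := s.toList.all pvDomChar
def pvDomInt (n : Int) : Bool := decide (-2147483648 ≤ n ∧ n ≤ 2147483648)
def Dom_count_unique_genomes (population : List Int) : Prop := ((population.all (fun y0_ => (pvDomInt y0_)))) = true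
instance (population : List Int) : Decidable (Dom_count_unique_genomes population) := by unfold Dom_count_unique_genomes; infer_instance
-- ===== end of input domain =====

-- B replaces A's quadratic visited-list membership scan by sort + one adjacent-comparison pass (objective: faster).

-- ===== PORT A =====
-- the for-loop over population, carrying visited_genomes and unique_counter
def cugLoop : List Int → List Int → Int → Int
  | [], _, c => c
  | g :: rest, visited, c =>
    if g ∈ visited then cugLoop rest visited c
    else cugLoop rest (visited ++ [g]) (c + 1)

def count_unique_genomes (population : List Int) : Int :=
  cugLoop population [] 0

-- ===== PORT B =====
-- the for-loop over srt[1:], carrying prev and count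
def cugGo : Int → Int → List Int → Int
  | _, c, [] => c
  | prev, c, g :: rest => cugGo g (if g ≠ prev then c + 1 else c) rest

def count_unique_genomes_alt (population : List Int) : Int :=
  let srt := PySem.List.sorted population (fun x => x) false
  match srt with
  | [] => 0
  | x :: xs => cugGo x 1 xs

-- ===== PRECONDITION & SPEC =====
def Spec_count_unique_genomes (population : List Int) (out : Int) : Prop := out = count_unique_genomes_alt population
instance (population : List Int) (out : Int) : Decidable (Spec_count_unique_genomes population out) := by unfold Spec_count_unique_genomes; infer_instance

-- ===== CLAIM (what is proved, stated in full; the proofs are below) =====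
def Claim_equal_count_unique_genomes : Prop := ∀ (population : List Int), Dom_count_unique_genomes population → Spec_count_unique_genomes population (count_unique_genomes population)

-- ===== LEMMAS AND PROOFS =====

theorem cugLoop_card (rest : List Int) : ∀ (visited : List Int) (c : Int),
    cugLoop rest visited c = c + ((rest.toFinset \ visited.toFinset).card : Int) := by
  induction rest with
  | nil => intro visited c; simp [cugLoop]
  | cons g rest ih =>
    intro visited c
    by_cases hg : g ∈ visited
    · rw [cugLoop, if_pos hg, ih]
      have : (g :: rest).toFinset \ visited.toFinset = rest.toFinset \ visited.toFinset := by
        ext x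
        simp only [List.toFinset_cons, Finset.mem_sdiff, Finset.mem_insert, List.mem_toFinset]
        constructor
        · rintro ⟨hx | hx, hv⟩
          · exact absurd (hx ▸ hg) hv
          · exact ⟨hx, hv⟩
        · rintro ⟨hx, hv⟩; exact ⟨Or.inr hx, hv⟩
      rw [this]
    · rw [cugLoop, if_neg hg, ih]
      have h1 : rest.toFinset \ (visited ++ [g]).toFinset
          = (rest.toFinset \ visited.toFinset).erase g := by
        ext x
        simp only [Finset.mem_sdiff, Finset.mem_erase, List.mem_toFinset, List.mem_append,
          List.mem_singleton]
        tauto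
      have h2 : (g :: rest).toFinset \ visited.toFinset
          = insert g (rest.toFinset \ visited.toFinset) := by
        ext x
        simp only [List.toFinset_cons, Finset.mem_sdiff, Finset.mem_insert, List.mem_toFinset]
        constructor
        · rintro ⟨hx | hx, hv⟩
          · exact Or.inl hx
          · exact Or.inr ⟨hx, hv⟩
        · rintro (rfl | ⟨hx, hv⟩)
          · exact ⟨Or.inl rfl, hg⟩
          · exact ⟨Or.inr hx, hv⟩
      have h3 : (insert g (rest.toFinset \ visited.toFinset)).card
          = ((rest.toFinset \ visited.toFinset).erase g).card + 1 := by
        by_cases hm : g ∈ rest.toFinset \ visited.toFinset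
        · rw [Finset.insert_eq_of_mem hm, ← Finset.card_erase_add_one hm]
        · rw [Finset.erase_eq_of_notMem hm, Finset.card_insert_of_notMem hm]
      rw [h1, h2, h3]
      push_cast
      ring

theorem cugGo_card (xs : List Int) : ∀ (prev c : Int),
    (prev :: xs).Pairwise (· ≤ ·) →
    cugGo prev c xs = c - 1 + (((prev :: xs).toFinset).card : Int) := by
  induction xs with
  | nil => intro prev c _; simp [cugGo]
  | cons g rest ih =>
    intro prev c hp
    have hle : prev ≤ g := (List.pairwise_cons.mp hp).1 g (by simp)
    have hprevall : ∀ x ∈ rest, prev ≤ x := fun x hx =>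
      (List.pairwise_cons.mp hp).1 x (by simp [hx])
    have hgrest : (g :: rest).Pairwise (· ≤ ·) := (List.pairwise_cons.mp hp).2
    have hgall : ∀ x ∈ rest, g ≤ x := (List.pairwise_cons.mp hgrest).1
    rw [cugGo, ih _ _ hgrest]
    by_cases hgp : g = prev
    · subst hgp
      simp
    · have hne : g ≠ prev := hgp
      have hnm : prev ∉ (g :: rest).toFinset := by
        simp only [List.toFinset_cons, Finset.mem_insert, List.mem_toFinset]
        rintro (rfl | hx)
        · exact hne rfl
        · exact hne (le_antisymm (hgall _ hx) hle)
      have hcard : ((prev :: g :: rest).toFinset).card = ((g :: rest).toFinset).card + 1 := by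
        rw [List.toFinset_cons, Finset.card_insert_of_notMem hnm]
      rw [if_pos hne, hcard]
      push_cast
      ring

theorem count_unique_genomes_eq_card (population : List Int) :
    count_unique_genomes population = (population.toFinset.card : Int) := by
  rw [count_unique_genomes, cugLoop_card]
  simp

theorem count_unique_genomes_alt_eq_card (population : List Int) :
    count_unique_genomes_alt population = (population.toFinset.card : Int) := by
  rw [count_unique_genomes_alt]
  have hperm : (PySem.List.sorted population (fun x => x) false).Perm population :=
    PySem.List.sorted_perm population (fun x => x) false
  have hfs : (PySem.List.sorted population (fun x => x) false).toFinset = population.toFinset := by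
    ext a; simp [List.mem_toFinset, hperm.mem_iff]
  have hpw : (PySem.List.sorted population (fun x => x) false).Pairwise (· ≤ ·) := by
    have := PySem.List.sorted_pairwise population (fun x => x)
    simpa using this
  cases hs : PySem.List.sorted population (fun x => x) false with
  | nil =>
    have : population = [] := (hs ▸ hperm).nil_eq.symm
    simp [this]
  | cons x xs =>
    rw [hs] at hfs hpw
    show cugGo x 1 xs = _
    rw [cugGo_card xs x 1 hpw, hfs]
    ring

-- ===== VERDICT (by name: the statement is the Claim_ definition above) =====
theorem count_unique_genomes_spec : Claim_equal_count_unique_genomes := by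
  intro population _
  unfold Spec_count_unique_genomes
  rw [count_unique_genomes_eq_card, count_unique_genomes_alt_eq_card]
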